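-- pv_equiv track=rewrite | github.com/Haskkor/ADS | Rendus MP/217972-213745-1ADS-Toulouse-MP-MEKRAOUI_PARIZOT/217972-1ADS-Toulouse-MP/alignements.py | alignementD2
-- ===== SOURCE A (Python) =====
-- def alignementD2(taille,plateau,win,joueur):
--     #diaginferieures
--     for i in range(taille):
--         cpt=0
--         for j in range (taille-i):
--             if plateau[taille-j-1][taille-j-i-1] == joueur:
--                 cpt+=1
--                 if cpt == win:
--                     return True
--             else:
--                 cpt=0
--     #diagsuperieures
--     for i in range(taille):
--         cpt=0
--         for j in range (taille-i):
--             if plateau[taille-i-j-1][taille-j-1] == joueur: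
--                 cpt+=1
--                 if cpt == win:
--                     return True
--             else:
--                 cpt=0
--     return False
-- ===== SOURCE B (Python) =====
-- def alignementD2(taille, plateau, win, joueur):
--     # DP sweep in row-major order: prev[j] = length of the diagonal run of
--     # joueur cells ending at (i-1, j); a run reaches length win exactly when
--     # some matching cell has run == win.
--     prev = [0] * taille
--     for i in range(taille):
--         cur = []
--         for j in range(taille):
--             if plateau[i][j] == joueur:
--                 run = (prev[j - 1] if j > 0 else 0) + 1
--                 if run == win:
--                     return True
--             else:
--                 run = 0
--             cur.append(run)
--         prev = cur
--     return False
-- ===== Notes on version B (the rewrite author's own statement) =====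
-- stated objective: alternative
-- what changed: Replaced the per-diagonal incremental-counter scans (two loop nests walking each diagonal bottom-up) by a single row-major dynamic-programming sweep that keeps the previous row's vector of diagonal run lengths (dp[j] = run ending at (i,j)) and reports a win when a matching cell's run reaches win.
-- outside the precondition, e.g. on alignementD2(2, [[], [5, 5]], 1, 5): A returns True, B raises IndexError
import Mathlib
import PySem

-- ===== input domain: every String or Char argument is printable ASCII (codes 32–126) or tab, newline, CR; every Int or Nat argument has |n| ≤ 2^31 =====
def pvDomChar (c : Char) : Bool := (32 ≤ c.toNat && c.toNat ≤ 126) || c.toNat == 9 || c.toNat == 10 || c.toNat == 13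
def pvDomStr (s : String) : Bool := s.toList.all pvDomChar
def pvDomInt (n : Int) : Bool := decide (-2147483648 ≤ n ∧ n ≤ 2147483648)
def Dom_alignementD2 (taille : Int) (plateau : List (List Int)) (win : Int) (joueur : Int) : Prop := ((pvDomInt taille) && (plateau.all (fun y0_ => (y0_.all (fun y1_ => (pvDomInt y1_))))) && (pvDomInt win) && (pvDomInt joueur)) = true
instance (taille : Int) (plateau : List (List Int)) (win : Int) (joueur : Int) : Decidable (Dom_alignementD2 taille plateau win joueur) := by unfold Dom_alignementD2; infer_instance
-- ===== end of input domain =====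

-- B replaces A's two per-diagonal counter scans by one row-major DP sweep keeping
-- the previous row's vector of diagonal run lengths (objective: alternative algorithm).

-- ===== PORT A =====
-- plateau[r][c] (indices here are always ≥ 0; none = IndexError, excluded by Pre_)
def pvCell (plateau : List (List Int)) (r c : Int) : Option Int :=
  (PySem.List.pyGet? plateau r).bind (fun row => PySem.List.pyGet? row c)

-- inner loop of the first (lower-diagonals) nest: 'for j in range(taille-i)' with counter cpt
def pvAInner1 (taille : Int) (plateau : List (List Int)) (win joueur i : Int) :
    List Int → Int → Bool
  | [], _ => false
  | j :: js, cpt =>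
    if pvCell plateau (taille - j - 1) (taille - j - i - 1) == some joueur then
      (if cpt + 1 = win then true else pvAInner1 taille plateau win joueur i js (cpt + 1))
    else pvAInner1 taille plateau win joueur i js 0

-- outer loop of the first nest: 'for i in range(taille)', early return True
def pvAOuter1 (taille : Int) (plateau : List (List Int)) (win joueur : Int) :
    List Int → Bool
  | [] => false
  | i :: is =>
    if pvAInner1 taille plateau win joueur i (PySem.List.pyRange 0 (taille - i) 1) 0 then true
    else pvAOuter1 taille plateau win joueur is

-- inner loop of the second (upper-diagonals) nest
def pvAInner2 (taille : Int) (plateau : List (List Int)) (win joueur i : Int) :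
    List Int → Int → Bool
  | [], _ => false
  | j :: js, cpt =>
    if pvCell plateau (taille - i - j - 1) (taille - j - 1) == some joueur then
      (if cpt + 1 = win then true else pvAInner2 taille plateau win joueur i js (cpt + 1))
    else pvAInner2 taille plateau win joueur i js 0

def pvAOuter2 (taille : Int) (plateau : List (List Int)) (win joueur : Int) :
    List Int → Bool
  | [] => false
  | i :: is =>
    if pvAInner2 taille plateau win joueur i (PySem.List.pyRange 0 (taille - i) 1) 0 then true
    else pvAOuter2 taille plateau win joueur is

def alignementD2 (taille : Int) (plateau : List (List Int)) (win : Int) (joueur : Int) : Bool :=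
  if pvAOuter1 taille plateau win joueur (PySem.List.pyRange 0 taille 1) then true
  else pvAOuter2 taille plateau win joueur (PySem.List.pyRange 0 taille 1)

-- ===== PORT B =====
-- inner loop over j (range(taille)); returns none for Python's 'return True',
-- some cur for the finished row list cur.  prev[j-1] is always in range here
-- (prev has length taille.toNat whenever it is read), so pyGetD is exact.
def pvBInner (plateau : List (List Int)) (win joueur i taille : Int) :
    List Int → List Int → List Int → Option (List Int)
  | [], _, cur => some cur
  | j :: js, prev, cur =>
    if pvCell plateau i j == some joueur then
      let run : Int := (if 0 < j then PySem.List.pyGetD prev (j - 1) 0 else 0) + 1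
      if run = win then none
      else pvBInner plateau win joueur i taille js prev (cur ++ [run])
    else pvBInner plateau win joueur i taille js prev (cur ++ [0])

-- outer loop over i (range(taille)), threading prev
def pvBOuter (plateau : List (List Int)) (win joueur taille : Int) :
    List Int → List Int → Bool
  | [], _ => false
  | i :: is, prev =>
    match pvBInner plateau win joueur i taille (PySem.List.pyRange 0 taille 1) prev [] with
    | none => true
    | some cur => pvBOuter plateau win joueur taille is cur

def alignementD2_alt (taille : Int) (plateau : List (List Int)) (win : Int) (joueur : Int) : Bool :=
  pvBOuter plateau win joueur taille (PySem.List.pyRange 0 taille 1)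
    (List.replicate taille.toNat 0)

-- ===== PRECONDITION & SPEC =====
-- Pre_ requires a full taille×taille board: taille ≤ number of rows and each of the
-- first taille rows has at least taille entries.  On ragged/short boards the Python
-- programs hit IndexError (A may also happen to return True just before reaching a
-- missing cell, since its diagonal order reads missing cells at different times than
-- B's row-major order) — those inputs are excluded.
def Pre_alignementD2 (taille : Int) (plateau : List (List Int)) (win : Int) (joueur : Int) : Prop :=
  taille ≤ plateau.length ∧ ∀ row ∈ plateau.take taille.toNat, taille ≤ row.length
instance (taille : Int) (plateau : List (List Int)) (win : Int) (joueur : Int) : Decidable (Pre_alignementD2 taille plateau win joueur) := by unfold Pre_alignementD2; infer_instance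

def pvWitness_alignementD2 : Int × List (List Int) × Int × Int := (2, [[1, 0], [0, 1]], 2, 1)

def Spec_alignementD2 (taille : Int) (plateau : List (List Int)) (win : Int) (joueur : Int) (out : Bool) : Prop := out = alignementD2_alt taille plateau win joueur
instance (taille : Int) (plateau : List (List Int)) (win : Int) (joueur : Int) (out : Bool) : Decidable (Spec_alignementD2 taille plateau win joueur out) := by unfold Spec_alignementD2; infer_instance

-- ===== CLAIM (what is proved, stated in full; the proofs are below) =====
def Claim_equal_alignementD2 : Prop := ∀ (taille : Int) (plateau : List (List Int)) (win : Int) (joueur : Int), Dom_alignementD2 taille plateau win joueur → Pre_alignementD2 taille plateau win joueur → Spec_alignementD2 taille plateau win joueur (alignementD2 taille plateau win joueur)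

-- ===== LEMMAS AND PROOFS =====

-- Both ports are total and in fact agree on ALL inputs; the proof goes through a
-- common specification: "some diagonal window of win consecutive joueur cells".

-- the cell predicate, over Nat coordinates
def pvG (plateau : List (List Int)) (joueur : Int) (r c : Nat) : Bool :=
  pvCell plateau (r : Int) (c : Int) == some joueur

-- "there are w consecutive matching cells going down-right from (r, c), inside [0,n)²"
def pvHasWin (n w : Nat) (g : Nat → Nat → Bool) : Prop :=
  ∃ r c : Nat, r + w ≤ n ∧ c + w ≤ n ∧ ∀ k < w, g (r + k) (c + k) = true

-- the abstract counter scan both of A's inner loops follow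
def pvScan (win : Int) : List Bool → Int → Bool
  | [], _ => false
  | b :: t, c => if b then (if c + 1 = win then true else pvScan win t (c + 1)) else pvScan win t 0

theorem pvAInner1_eq_scan (taille : Int) (plateau : List (List Int)) (win joueur i : Int)
    (js : List Int) (cpt : Int) :
    pvAInner1 taille plateau win joueur i js cpt =
      pvScan win (js.map fun j => pvCell plateau (taille - j - 1) (taille - j - i - 1) == some joueur) cpt := by
  induction js generalizing cpt with
  | nil => rfl
  | cons j js ih => simp only [pvAInner1, List.map_cons, pvScan, ih]

theorem pvAInner2_eq_scan (taille : Int) (plateau : List (List Int)) (win joueur i : Int)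
    (js : List Int) (cpt : Int) :
    pvAInner2 taille plateau win joueur i js cpt =
      pvScan win (js.map fun j => pvCell plateau (taille - i - j - 1) (taille - j - 1) == some joueur) cpt := by
  induction js generalizing cpt with
  | nil => rfl
  | cons j js ih => simp only [pvAInner2, List.map_cons, pvScan, ih]

theorem pvScan_nonpos (win : Int) (hw : win ≤ 0) (l : List Bool) :
    ∀ c : Int, 0 ≤ c → pvScan win l c = false := by
  induction l with
  | nil => intro c _; rfl
  | cons b t ih =>
    intro c hc
    simp only [pvScan]
    by_cases hb : b = true
    · simp only [hb, if_true]
      have : ¬ (c + 1 = win) := by omega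
      simp only [this, if_false]
      exact ih (c + 1) (by omega)
    · simp only [eq_false_of_ne_true hb, if_false]
      exact ih 0 le_rfl

-- the counter scan returns true iff some window of trues closes the gap to win
theorem pvScan_iff (win : Int) (l : List Bool) :
    ∀ c : Int, 0 ≤ c → c < win →
    (pvScan win l c = true ↔
      ∃ s t : Nat, s + t ≤ l.length ∧ (∀ k < t, l.getD (s + k) false = true) ∧
        (if s = 0 then c else 0) + (t : Int) = win) := by
  induction l with
  | nil =>
    intro c hc hcw
    simp only [pvScan, List.length_nil]
    constructor
    · intro h; exact absurd h (by simp)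
    · rintro ⟨s, t, h1, _, h3⟩
      have hs : s = 0 := by omega
      have ht : t = 0 := by omega
      subst hs; subst ht; simp at h3; omega
  | cons b l ih =>
    intro c hc hcw
    cases hb : b with
    | true =>
      by_cases hw : c + 1 = win
      · simp only [pvScan, hb, if_true, hw, if_pos rfl]
        constructor
        · intro _
          refine ⟨0, 1, by simp, ?_, by simpa using hw⟩
          intro k hk
          interval_cases k
          simpa using hb
        · intro _; trivial
      · simp only [pvScan, hb, if_true, if_neg hw]
        rw [ih (c + 1) (by omega) (by omega)]
        constructor
        · rintro ⟨s, t, h1, h2, h3⟩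
          rcases Nat.eq_zero_or_pos s with hs | hs
          · subst hs
            refine ⟨0, t + 1, by simp at h1 ⊢; omega, ?_, ?_⟩
            · intro k hk
              cases k with
              | zero => simpa using hb
              | succ k =>
                have : (0:Nat) + (k + 1) = (0 + k) + 1 := by omega
                rw [this, List.getD_cons_succ]
                exact h2 k (by omega)
            · simp at h3 ⊢; push_cast; omega
          · refine ⟨s + 1, t, by simp at h1 ⊢; omega, ?_, ?_⟩
            · intro k hk
              have : s + 1 + k = (s + k) + 1 := by omega
              rw [this, List.getD_cons_succ]
              exact h2 k hk
            · have h0 : ¬ (s = 0) := by omega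
              have h0' : ¬ (s + 1 = 0) := by omega
              rw [if_neg h0] at h3; rw [if_neg h0']; exact h3
        · rintro ⟨s, t, h1, h2, h3⟩
          rcases Nat.eq_zero_or_pos s with hs | hs
          · subst hs
            rw [if_pos rfl] at h3
            cases t with
            | zero => simp at h3; omega
            | succ t =>
              refine ⟨0, t, by simp at h1 ⊢; omega, ?_, ?_⟩
              · intro k hk
                have h2' := h2 (k + 1) (by omega)
                have : (0:Nat) + (k + 1) = (0 + k) + 1 := by omega
                rw [this, List.getD_cons_succ] at h2'
                exact h2'
              · rw [if_pos rfl]; push_cast at h3 ⊢; omega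
          · -- s ≥ 1; t = win
            rw [if_neg (by omega : ¬ s = 0)] at h3
            rcases Nat.lt_or_ge 1 s with hs2 | hs2
            · -- s ≥ 2
              refine ⟨s - 1, t, by simp at h1 ⊢; omega, ?_, ?_⟩
              · intro k hk
                have h2' := h2 k hk
                have : s + k = ((s - 1) + k) + 1 := by omega
                rw [this, List.getD_cons_succ] at h2'
                exact h2'
              · rw [if_neg (by omega : ¬ s - 1 = 0)]; omega
            · -- s = 1: truncate the window to length win - (c+1)
              have hs1 : s = 1 := by omega
              subst hs1
              refine ⟨0, (win - (c + 1)).toNat, ?_, ?_, ?_⟩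
              · simp at h1 ⊢; omega
              · intro k hk
                have hkt : k < t := by omega
                have h2' := h2 k hkt
                have : (1:Nat) + k = (0 + k) + 1 := by omega
                rw [this, List.getD_cons_succ] at h2'
                exact h2'
              · rw [if_pos rfl]; push_cast; omega
    | false =>
      simp only [pvScan, hb, Bool.false_eq_true, if_false]
      rw [ih 0 le_rfl (by omega)]
      constructor
      · rintro ⟨s, t, h1, h2, h3⟩
        refine ⟨s + 1, t, by simp at h1 ⊢; omega, ?_, ?_⟩
        · intro k hk
          have : s + 1 + k = (s + k) + 1 := by omega
          rw [this, List.getD_cons_succ]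
          exact h2 k hk
        · rw [if_neg (by omega : ¬ s + 1 = 0)]
          split at h3 <;> [exact h3; exact h3]
      · rintro ⟨s, t, h1, h2, h3⟩
        rcases Nat.eq_zero_or_pos s with hs | hs
        · subst hs
          rw [if_pos rfl] at h3
          cases t with
          | zero => simp at h3; omega
          | succ t =>
            have h2' := h2 0 (by omega)
            simp [hb] at h2'
        · refine ⟨s - 1, t, by simp at h1 ⊢; omega, ?_, ?_⟩
          · intro k hk
            have h2' := h2 k hk
            have : s + k = ((s - 1) + k) + 1 := by omega
            rw [this, List.getD_cons_succ] at h2'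
            exact h2'
          · rw [if_neg (by omega : ¬ s = 0)] at h3
            split <;> [exact h3; exact h3]

theorem pvScan_zero_iff (win : Int) (l : List Bool) :
    pvScan win l 0 = true ↔
      (0 < win ∧ ∃ s : Nat, s + win.toNat ≤ l.length ∧
        ∀ k < win.toNat, l.getD (s + k) false = true) := by
  rcases le_or_gt win 0 with hw | hw
  · rw [pvScan_nonpos win hw l 0 le_rfl]
    simp only [Bool.false_eq_true, false_iff]
    rintro ⟨h, _⟩; omega
  · rw [pvScan_iff win l 0 le_rfl hw]
    constructor
    · rintro ⟨s, t, h1, h2, h3⟩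
      have ht : t = win.toNat := by split at h3 <;> omega
      subst ht
      exact ⟨hw, s, h1, h2⟩
    · rintro ⟨_, s, h1, h2⟩
      exact ⟨s, win.toNat, h1, h2, by split <;> omega⟩

-- ===== A-side characterization =====

theorem pvAOuter1_iff (taille : Int) (plateau : List (List Int)) (win joueur : Int)
    (is : List Int) :
    pvAOuter1 taille plateau win joueur is = true ↔
      ∃ i ∈ is, pvAInner1 taille plateau win joueur i (PySem.List.pyRange 0 (taille - i) 1) 0 = true := by
  induction is with
  | nil => simp [pvAOuter1]
  | cons i is ih =>
    cases h : pvAInner1 taille plateau win joueur i (PySem.List.pyRange 0 (taille - i) 1) 0 with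
    | true => simp [pvAOuter1, h]
    | false =>
      simp only [pvAOuter1, h, Bool.false_eq_true, if_false, ih, List.mem_cons]
      constructor
      · rintro ⟨i', hi', h'⟩; exact ⟨i', Or.inr hi', h'⟩
      · rintro ⟨i', hi' | hi', h'⟩
        · rw [hi'] at h'; simp [h'] at h
        · exact ⟨i', hi', h'⟩

theorem pvAOuter2_iff (taille : Int) (plateau : List (List Int)) (win joueur : Int)
    (is : List Int) :
    pvAOuter2 taille plateau win joueur is = true ↔
      ∃ i ∈ is, pvAInner2 taille plateau win joueur i (PySem.List.pyRange 0 (taille - i) 1) 0 = true := by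
  induction is with
  | nil => simp [pvAOuter2]
  | cons i is ih =>
    cases h : pvAInner2 taille plateau win joueur i (PySem.List.pyRange 0 (taille - i) 1) 0 with
    | true => simp [pvAOuter2, h]
    | false =>
      simp only [pvAOuter2, h, Bool.false_eq_true, if_false, ih, List.mem_cons]
      constructor
      · rintro ⟨i', hi', h'⟩; exact ⟨i', Or.inr hi', h'⟩
      · rintro ⟨i', hi' | hi', h'⟩
        · rw [hi'] at h'; simp [h'] at h
        · exact ⟨i', hi', h'⟩

theorem pvGetD_map_pyRange_bool (f : Int → Bool) (m k : Nat) (hk : k < m) :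
    ((PySem.List.pyRange 0 (m : Int) 1).map f).getD k false = f k := by
  rw [List.getD_eq_getElem?_getD, PySem.List.getElem?_map_pyRange_zero f m k hk]
  rfl

theorem pvLower_iff (taille : Int) (plateau : List (List Int)) (win joueur : Int) :
    pvAOuter1 taille plateau win joueur (PySem.List.pyRange 0 taille 1) = true ↔
      (0 < win ∧ ∃ r c : Nat, r + win.toNat ≤ taille.toNat ∧ c + win.toNat ≤ taille.toNat ∧
        c ≤ r ∧ ∀ k < win.toNat, pvG plateau joueur (r + k) (c + k) = true) := by
  rw [pvAOuter1_iff]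
  constructor
  · rintro ⟨i, hmem, hinner⟩
    rw [PySem.List.mem_pyRange_one] at hmem
    obtain ⟨hi0, hi1⟩ := hmem
    rw [pvAInner1_eq_scan, pvScan_zero_iff] at hinner
    obtain ⟨hwpos, s, hlen, hmatch⟩ := hinner
    rw [List.length_map, PySem.List.length_pyRange_one] at hlen
    refine ⟨hwpos, taille.toNat - s - win.toNat, taille.toNat - s - win.toNat - i.toNat,
      by omega, by omega, by omega, ?_⟩
    intro k hk
    have h := hmatch (win.toNat - 1 - k) (by omega)
    rw [show taille - i = (((taille - i).toNat : Nat) : Int) by omega] at h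
    rw [pvGetD_map_pyRange_bool _ _ _ (by omega)] at h
    unfold pvG
    rw [show ((taille.toNat - s - win.toNat + k : Nat) : Int)
          = taille - ((s + (win.toNat - 1 - k) : Nat) : Int) - 1 by push_cast; omega,
        show ((taille.toNat - s - win.toNat - i.toNat + k : Nat) : Int)
          = taille - ((s + (win.toNat - 1 - k) : Nat) : Int) - i - 1 by push_cast; omega]
    exact h
  · rintro ⟨hwpos, r, c, hr, hc, hcr, hwin⟩
    have hw1 : 1 ≤ win.toNat := by omega
    refine ⟨((r - c : Nat) : Int), ?_, ?_⟩
    · rw [PySem.List.mem_pyRange_one]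
      constructor
      · positivity
      · omega
    · rw [pvAInner1_eq_scan, pvScan_zero_iff]
      refine ⟨hwpos, taille.toNat - win.toNat - r, ?_, ?_⟩
      · rw [List.length_map, PySem.List.length_pyRange_one]; omega
      · intro k hk
        rw [show taille - ((r - c : Nat) : Int)
              = (((taille - ((r - c : Nat) : Int)).toNat : Nat) : Int) by push_cast; omega]
        rw [pvGetD_map_pyRange_bool _ _ _ (by omega)]
        have h := hwin (win.toNat - 1 - k) (by omega)
        unfold pvG at h
        rw [show taille - ((taille.toNat - win.toNat - r + k : Nat) : Int) - 1
              = ((r + (win.toNat - 1 - k) : Nat) : Int) by push_cast; omega,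
            show taille - ((taille.toNat - win.toNat - r + k : Nat) : Int) - ((r - c : Nat) : Int) - 1
              = ((c + (win.toNat - 1 - k) : Nat) : Int) by push_cast; omega]
        exact h

theorem pvUpper_iff (taille : Int) (plateau : List (List Int)) (win joueur : Int) :
    pvAOuter2 taille plateau win joueur (PySem.List.pyRange 0 taille 1) = true ↔
      (0 < win ∧ ∃ r c : Nat, r + win.toNat ≤ taille.toNat ∧ c + win.toNat ≤ taille.toNat ∧
        r ≤ c ∧ ∀ k < win.toNat, pvG plateau joueur (r + k) (c + k) = true) := by
  rw [pvAOuter2_iff]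
  constructor
  · rintro ⟨i, hmem, hinner⟩
    rw [PySem.List.mem_pyRange_one] at hmem
    obtain ⟨hi0, hi1⟩ := hmem
    rw [pvAInner2_eq_scan, pvScan_zero_iff] at hinner
    obtain ⟨hwpos, s, hlen, hmatch⟩ := hinner
    rw [List.length_map, PySem.List.length_pyRange_one] at hlen
    refine ⟨hwpos, taille.toNat - s - win.toNat - i.toNat, taille.toNat - s - win.toNat,
      by omega, by omega, by omega, ?_⟩
    intro k hk
    have h := hmatch (win.toNat - 1 - k) (by omega)
    rw [show taille - i = (((taille - i).toNat : Nat) : Int) by omega] at h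
    rw [pvGetD_map_pyRange_bool _ _ _ (by omega)] at h
    unfold pvG
    rw [show ((taille.toNat - s - win.toNat - i.toNat + k : Nat) : Int)
          = (((taille - i).toNat : Nat) : Int) - ((s + (win.toNat - 1 - k) : Nat) : Int) - 1 by push_cast; omega,
        show ((taille.toNat - s - win.toNat + k : Nat) : Int)
          = taille - ((s + (win.toNat - 1 - k) : Nat) : Int) - 1 by push_cast; omega]
    exact h
  · rintro ⟨hwpos, r, c, hr, hc, hcr, hwin⟩
    have hw1 : 1 ≤ win.toNat := by omega
    refine ⟨((c - r : Nat) : Int), ?_, ?_⟩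
    · rw [PySem.List.mem_pyRange_one]
      constructor
      · positivity
      · omega
    · rw [pvAInner2_eq_scan, pvScan_zero_iff]
      refine ⟨hwpos, taille.toNat - win.toNat - c, ?_, ?_⟩
      · rw [List.length_map, PySem.List.length_pyRange_one]; omega
      · intro k hk
        rw [show taille - ((c - r : Nat) : Int)
              = (((taille - ((c - r : Nat) : Int)).toNat : Nat) : Int) by push_cast; omega]
        rw [pvGetD_map_pyRange_bool _ _ _ (by omega)]
        have h := hwin (win.toNat - 1 - k) (by omega)
        unfold pvG at h
        rw [show (((taille - ((c - r : Nat) : Int)).toNat : Nat) : Int) - ((taille.toNat - win.toNat - c + k : Nat) : Int) - 1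
              = ((r + (win.toNat - 1 - k) : Nat) : Int) by push_cast; omega,
            show taille - ((taille.toNat - win.toNat - c + k : Nat) : Int) - 1
              = ((c + (win.toNat - 1 - k) : Nat) : Int) by push_cast; omega]
        exact h

theorem alignementD2_iff (taille : Int) (plateau : List (List Int)) (win joueur : Int) :
    alignementD2 taille plateau win joueur = true ↔
      (0 < win ∧ pvHasWin taille.toNat win.toNat (pvG plateau joueur)) := by
  have hsplit : alignementD2 taille plateau win joueur = true ↔
      (pvAOuter1 taille plateau win joueur (PySem.List.pyRange 0 taille 1) = true ∨
       pvAOuter2 taille plateau win joueur (PySem.List.pyRange 0 taille 1) = true) := by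
    unfold alignementD2
    cases h : pvAOuter1 taille plateau win joueur (PySem.List.pyRange 0 taille 1) <;> simp [h]
  rw [hsplit, pvLower_iff, pvUpper_iff]
  unfold pvHasWin
  constructor
  · rintro (⟨hw, r, c, h1, h2, _, h4⟩ | ⟨hw, r, c, h1, h2, _, h4⟩) <;>
      exact ⟨hw, r, c, h1, h2, h4⟩
  · rintro ⟨hw, r, c, h1, h2, h3⟩
    rcases Nat.le_total c r with hcr | hcr
    · exact Or.inl ⟨hw, r, c, h1, h2, hcr, h3⟩
    · exact Or.inr ⟨hw, r, c, h1, h2, hcr, h3⟩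

-- ===== B-side characterization =====

-- the DP value: length of the run of matching cells ending at (i, j) going up-left
def pvD (g : Nat → Nat → Bool) : Nat → Nat → Int
  | 0, j => if g 0 j then 1 else 0
  | i + 1, 0 => if g (i + 1) 0 then 1 else 0
  | i + 1, j + 1 => if g (i + 1) (j + 1) then pvD g i j + 1 else 0

theorem pvD_nonneg (g : Nat → Nat → Bool) : ∀ i j, 0 ≤ pvD g i j := by
  intro i
  induction i with
  | zero => intro j; simp only [pvD]; split <;> omega
  | succ i ih =>
    intro j
    cases j with
    | zero => simp only [pvD]; split <;> omega
    | succ j => simp only [pvD]; split; · have := ih j; omega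
                · omega

-- the vector fed into row i as `prev`
def pvPrevFn (g : Nat → Nat → Bool) (i j : Nat) : Int :=
  if i = 0 then 0 else pvD g (i - 1) j

theorem pvD_zero_of_not (g : Nat → Nat → Bool) (i j : Nat) (h : g i j = false) :
    pvD g i j = 0 := by
  cases i with
  | zero => simp [pvD, h]
  | succ i => cases j with
    | zero => simp [pvD, h]
    | succ j => simp [pvD, h]

-- the `run` value B computes is exactly the DP value pvD
theorem pvRun_eq (plateau : List (List Int)) (joueur : Int) (n i j : Nat)
    (hj : j < n) (hg : pvG plateau joueur i j = true) :
    (if 0 < (j : Int) then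
        PySem.List.pyGetD ((List.range n).map (pvPrevFn (pvG plateau joueur) i)) ((j : Int) - 1) 0
      else 0) + 1 = pvD (pvG plateau joueur) i j := by
  cases j with
  | zero =>
    simp only [Nat.cast_zero, lt_irrefl, if_false]
    cases i with
    | zero => simp [pvD, hg]
    | succ i => simp [pvD, hg]
  | succ j =>
    rw [if_pos (by positivity)]
    rw [show ((j + 1 : Nat) : Int) - 1 = ((j : Nat) : Int) by push_cast; ring]
    rw [PySem.List.pyGetD_natCast]
    rw [List.getD_eq_getElem?_getD]
    rw [List.getElem?_map]
    rw [List.getElem?_range (by omega)]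
    cases i with
    | zero => simp [pvPrevFn, pvD, hg]
    | succ i => simp [pvPrevFn, pvD, hg]

theorem pvBInner_none (plateau : List (List Int)) (win joueur taille : Int)
    (ht : 0 ≤ taille) (i : Nat) :
    ∀ j0 : Nat, j0 ≤ taille.toNat → ∀ cur : List Int,
    (∃ j : Nat, j0 ≤ j ∧ j < taille.toNat ∧ pvG plateau joueur i j = true ∧
        pvD (pvG plateau joueur) i j = win) →
    pvBInner plateau win joueur (i : Int) taille
      (PySem.List.pyRange (j0 : Int) taille 1)
      ((List.range taille.toNat).map (pvPrevFn (pvG plateau joueur) i)) cur = none := by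
  intro j0
  induction hm : taille.toNat - j0 generalizing j0 with
  | zero =>
    rintro hj0 cur ⟨j, h1, h2, _⟩; omega
  | succ m ih =>
    rintro hj0 cur ⟨j, h1, h2, hgj, hDj⟩
    have hlt : ((j0 : Nat) : Int) < taille := by omega
    rw [PySem.List.pyRange_one_cons hlt]
    rw [show ((j0 : Nat) : Int) + 1 = ((j0 + 1 : Nat) : Int) by push_cast; ring]
    simp only [pvBInner]
    by_cases hg : pvCell plateau (i : Int) (j0 : Int) == some joueur
    · rw [if_pos hg]
      have hg' : pvG plateau joueur i j0 = true := hg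
      rw [pvRun_eq plateau joueur taille.toNat i j0 (by omega) hg']
      by_cases hwin : pvD (pvG plateau joueur) i j0 = win
      · rw [if_pos hwin]
      · rw [if_neg hwin]
        have hjne : j0 < j := by
          rcases Nat.lt_or_ge j0 j with h | h
          · exact h
          · have : j = j0 := by omega
            rw [this] at hDj; exact absurd hDj hwin
        exact ih (j0 + 1) (by omega) (by omega) _ ⟨j, by omega, h2, hgj, hDj⟩
    · rw [if_neg hg]
      have hjne : j0 < j := by
        rcases Nat.lt_or_ge j0 j with h | h
        · exact h
        · have : j = j0 := by omega
          rw [this] at hgj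
          exact absurd (hgj : (pvCell plateau (i : Int) (j0 : Int) == some joueur) = true) hg
      exact ih (j0 + 1) (by omega) (by omega) _ ⟨j, by omega, h2, hgj, hDj⟩

theorem pvBInner_some (plateau : List (List Int)) (win joueur taille : Int)
    (ht : 0 ≤ taille) (i : Nat) :
    ∀ j0 : Nat, j0 ≤ taille.toNat → ∀ cur : List Int,
    (∀ j : Nat, j0 ≤ j → j < taille.toNat → pvG plateau joueur i j = true →
        pvD (pvG plateau joueur) i j ≠ win) →
    pvBInner plateau win joueur (i : Int) taille
      (PySem.List.pyRange (j0 : Int) taille 1)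
      ((List.range taille.toNat).map (pvPrevFn (pvG plateau joueur) i)) cur =
      some (cur ++ (List.range' j0 (taille.toNat - j0)).map (pvD (pvG plateau joueur) i)) := by
  intro j0
  induction hm : taille.toNat - j0 generalizing j0 with
  | zero =>
    intro hj0 cur _
    rw [PySem.List.pyRange_one_eq_nil (by omega)]
    simp [pvBInner]
  | succ m ih =>
    intro hj0 cur hno
    have hlt : ((j0 : Nat) : Int) < taille := by omega
    rw [PySem.List.pyRange_one_cons hlt]
    rw [show ((j0 : Nat) : Int) + 1 = ((j0 + 1 : Nat) : Int) by push_cast; ring]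
    simp only [pvBInner]
    by_cases hg : pvCell plateau (i : Int) (j0 : Int) == some joueur
    · rw [if_pos hg]
      have hg' : pvG plateau joueur i j0 = true := hg
      rw [pvRun_eq plateau joueur taille.toNat i j0 (by omega) hg']
      rw [if_neg (hno j0 le_rfl (by omega) hg')]
      rw [ih (j0 + 1) (by omega) (by omega) _ (fun j h1 h2 h3 => hno j (by omega) h2 h3)]
      have hm' : taille.toNat - (j0 + 1) = m := by omega
      simp [List.range'_succ, hm']
    · rw [if_neg hg]
      rw [ih (j0 + 1) (by omega) (by omega) _ (fun j h1 h2 h3 => hno j (by omega) h2 h3)]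
      have hg0 : pvD (pvG plateau joueur) i j0 = 0 :=
        pvD_zero_of_not _ _ _ (by simpa [pvG] using hg)
      have hm' : taille.toNat - (j0 + 1) = m := by omega
      simp [List.range'_succ, hm', hg0]

theorem pvRow_shift (g : Nat → Nat → Bool) (n i0 : Nat) :
    ([] : List Int) ++ (List.range' 0 (n - 0)).map (pvD g i0) =
      (List.range n).map (pvPrevFn g (i0 + 1)) := by
  simp only [List.nil_append, Nat.sub_zero, ← List.range_eq_range']
  apply List.map_congr_left
  intro a _
  simp [pvPrevFn]

theorem pvBOuter_true (plateau : List (List Int)) (win joueur taille : Int)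
    (ht : 0 ≤ taille) :
    ∀ i0 : Nat, i0 ≤ taille.toNat →
    (∃ i j : Nat, i0 ≤ i ∧ i < taille.toNat ∧ j < taille.toNat ∧
        pvG plateau joueur i j = true ∧ pvD (pvG plateau joueur) i j = win) →
    pvBOuter plateau win joueur taille (PySem.List.pyRange (i0 : Int) taille 1)
      ((List.range taille.toNat).map (pvPrevFn (pvG plateau joueur) i0)) = true := by
  intro i0
  induction hm : taille.toNat - i0 generalizing i0 with
  | zero =>
    rintro hi0 ⟨i, j, h1, h2, _⟩; omega
  | succ m ih =>
    rintro hi0 ⟨i, j, h1, h2, h3, h4, h5⟩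
    have hlt : ((i0 : Nat) : Int) < taille := by omega
    rw [PySem.List.pyRange_one_cons hlt]
    rw [show ((i0 : Nat) : Int) + 1 = ((i0 + 1 : Nat) : Int) by push_cast; ring]
    simp only [pvBOuter]
    by_cases hrow : ∃ j : Nat, 0 ≤ j ∧ j < taille.toNat ∧ pvG plateau joueur i0 j = true ∧
        pvD (pvG plateau joueur) i0 j = win
    · rw [show (0 : Int) = ((0 : Nat) : Int) by rfl,
        pvBInner_none plateau win joueur taille ht i0 0 (by omega) [] hrow]
    · have hno : ∀ j : Nat, 0 ≤ j → j < taille.toNat → pvG plateau joueur i0 j = true →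
          pvD (pvG plateau joueur) i0 j ≠ win := by
        intro j hj1 hj2 hj3 hj4
        exact hrow ⟨j, hj1, hj2, hj3, hj4⟩
      rw [show (0 : Int) = ((0 : Nat) : Int) by rfl,
        pvBInner_some plateau win joueur taille ht i0 0 (by omega) [] hno]
      rw [pvRow_shift (pvG plateau joueur) taille.toNat i0]
      apply ih (i0 + 1) (by omega) (by omega)
      have hii : i0 < i ∨ i = i0 := by omega
      rcases hii with hii | hii
      · exact ⟨i, j, by omega, h2, h3, h4, h5⟩
      · rw [hii] at h4 h5
        exact absurd h5 (hno j (by omega) h3 h4)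

theorem pvBOuter_false (plateau : List (List Int)) (win joueur taille : Int)
    (ht : 0 ≤ taille) :
    ∀ i0 : Nat, i0 ≤ taille.toNat →
    (∀ i j : Nat, i0 ≤ i → i < taille.toNat → j < taille.toNat →
        pvG plateau joueur i j = true → pvD (pvG plateau joueur) i j ≠ win) →
    pvBOuter plateau win joueur taille (PySem.List.pyRange (i0 : Int) taille 1)
      ((List.range taille.toNat).map (pvPrevFn (pvG plateau joueur) i0)) = false := by
  intro i0
  induction hm : taille.toNat - i0 generalizing i0 with
  | zero =>
    intro hi0 _
    rw [PySem.List.pyRange_one_eq_nil (by omega)]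
    rfl
  | succ m ih =>
    intro hi0 hno
    have hlt : ((i0 : Nat) : Int) < taille := by omega
    rw [PySem.List.pyRange_one_cons hlt]
    rw [show ((i0 : Nat) : Int) + 1 = ((i0 + 1 : Nat) : Int) by push_cast; ring]
    simp only [pvBOuter]
    rw [show (0 : Int) = ((0 : Nat) : Int) by rfl,
      pvBInner_some plateau win joueur taille ht i0 0 (by omega) []
        (fun j h1 h2 h3 => hno i0 j le_rfl (by omega) h2 h3)]
    rw [pvRow_shift (pvG plateau joueur) taille.toNat i0]
    exact ih (i0 + 1) (by omega) (by omega)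
      (fun i j h1 h2 h3 h4 => hno i j (by omega) h2 h3 h4)

theorem alignementD2_alt_iff (taille : Int) (plateau : List (List Int)) (win joueur : Int) :
    alignementD2_alt taille plateau win joueur = true ↔
      ∃ i j : Nat, i < taille.toNat ∧ j < taille.toNat ∧
        pvG plateau joueur i j = true ∧ pvD (pvG plateau joueur) i j = win := by
  unfold alignementD2_alt
  rcases le_or_gt taille 0 with ht | ht
  · rw [PySem.List.pyRange_one_eq_nil ht]
    simp only [pvBOuter, Bool.false_eq_true, false_iff]
    rintro ⟨i, j, hi, _⟩
    omega
  · have hrep : List.replicate taille.toNat (0 : Int) =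
        (List.range taille.toNat).map (pvPrevFn (pvG plateau joueur) 0) := by
      have : pvPrevFn (pvG plateau joueur) 0 = fun _ => (0 : Int) := by
        funext j; simp [pvPrevFn]
      rw [this, List.map_const', List.length_range]
    rw [hrep, show (0 : Int) = ((0 : Nat) : Int) by rfl]
    by_cases hex : ∃ i j : Nat, i < taille.toNat ∧ j < taille.toNat ∧
        pvG plateau joueur i j = true ∧ pvD (pvG plateau joueur) i j = win
    · obtain ⟨i, j, h1, h2, h3, h4⟩ := hex
      rw [pvBOuter_true plateau win joueur taille (by omega) 0 (by omega)
        ⟨i, j, by omega, h1, h2, h3, h4⟩]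
      simp only [true_iff]
      exact ⟨i, j, h1, h2, h3, h4⟩
    · rw [pvBOuter_false plateau win joueur taille (by omega) 0 (by omega)
        (fun i j _ h2 h3 h4 h5 => hex ⟨i, j, h2, h3, h4, h5⟩)]
      simp only [Bool.false_eq_true, false_iff]
      exact hex

-- ===== connecting the two characterizations =====

theorem pvD_pos_of_g (g : Nat → Nat → Bool) (i j : Nat) (h : g i j = true) :
    1 ≤ pvD g i j := by
  cases i with
  | zero => simp [pvD, h]
  | succ i =>
    cases j with
    | zero => simp [pvD, h]
    | succ j =>
      simp only [pvD, h, if_true]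
      have := pvD_nonneg g i j
      omega

theorem pvD_run (g : Nat → Nat → Bool) :
    ∀ i j, (pvD g i j).toNat ≤ i + 1 ∧ (pvD g i j).toNat ≤ j + 1 ∧
      ∀ k < (pvD g i j).toNat, g (i - k) (j - k) = true := by
  intro i
  induction i with
  | zero =>
    intro j
    cases hg : g 0 j with
    | false => simp [pvD, hg]
    | true =>
      simp only [pvD, hg, if_true]
      refine ⟨by norm_num, by norm_num, ?_⟩
      intro k hk
      norm_num at hk
      subst hk
      simpa using hg
  | succ i ih =>
    intro j
    cases j with
    | zero =>
      cases hg : g (i + 1) 0 with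
      | false => simp [pvD, hg]
      | true =>
        simp only [pvD, hg, if_true]
        refine ⟨by norm_num, by norm_num, ?_⟩
        intro k hk
        norm_num at hk
        subst hk
        simpa using hg
    | succ j =>
      cases hg : g (i + 1) (j + 1) with
      | false => simp [pvD, hg]
      | true =>
        simp only [pvD, hg, if_true]
        obtain ⟨hb1, hb2, hrun⟩ := ih j
        have hnn := pvD_nonneg g i j
        have htn : (pvD g i j + 1).toNat = (pvD g i j).toNat + 1 := by omega
        rw [htn]
        refine ⟨by omega, by omega, ?_⟩
        intro k hk
        cases k with
        | zero => simpa using hg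
        | succ k =>
          have : i + 1 - (k + 1) = i - k := by omega
          rw [this, show j + 1 - (k + 1) = j - k by omega]
          exact hrun k (by omega)

theorem pvD_ge_of_run (g : Nat → Nat → Bool) (r c : Nat) (w : Nat)
    (h : ∀ k < w, g (r + k) (c + k) = true) :
    ∀ k < w, (k : Int) + 1 ≤ pvD g (r + k) (c + k) := by
  intro k
  induction k with
  | zero =>
    intro hk
    have := pvD_pos_of_g g r c (by simpa using h 0 hk)
    simpa using this
  | succ k ih =>
    intro hk
    have hih := ih (by omega)
    have hg := h (k + 1) hk
    have e1 : r + (k + 1) = (r + k) + 1 := by omega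
    have e2 : c + (k + 1) = (c + k) + 1 := by omega
    rw [e1, e2]
    rw [e1, e2] at hg
    simp only [pvD, hg, if_true]
    push_cast
    omega

theorem pvD_intermediate (g : Nat → Nat → Bool) (v : Int) (hv : 1 ≤ v) :
    ∀ i j, v ≤ pvD g i j → ∃ k, k ≤ i ∧ k ≤ j ∧ pvD g (i - k) (j - k) = v := by
  intro i
  induction i with
  | zero =>
    intro j hle
    refine ⟨0, le_rfl, Nat.zero_le _, ?_⟩
    simp only [Nat.sub_zero]
    have : pvD g 0 j ≤ 1 := by
      simp only [pvD]; split <;> omega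
    omega
  | succ i ih =>
    intro j hle
    by_cases heq : pvD g (i + 1) j = v
    · exact ⟨0, Nat.zero_le _, Nat.zero_le _, by simpa using heq⟩
    · cases j with
      | zero =>
        have : pvD g (i + 1) 0 ≤ 1 := by
          simp only [pvD]; split <;> omega
        omega
      | succ j =>
        cases hg : g (i + 1) (j + 1) with
        | false =>
          rw [pvD_zero_of_not g _ _ hg] at hle
          omega
        | true =>
          have hstep : pvD g (i + 1) (j + 1) = pvD g i j + 1 := by
            simp [pvD, hg]
          have hle' : v ≤ pvD g i j := by
            rw [hstep] at heq hle
            omega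
          obtain ⟨k, hk1, hk2, hk3⟩ := ih j hle'
          exact ⟨k + 1, by omega, by omega,
            by rw [show i + 1 - (k + 1) = i - k by omega,
                   show j + 1 - (k + 1) = j - k by omega]; exact hk3⟩

theorem pvD_pos_g (g : Nat → Nat → Bool) (i j : Nat) (h : 0 < pvD g i j) : g i j = true := by
  cases i with
  | zero => simp only [pvD] at h; by_contra hg; simp [eq_false_of_ne_true hg] at h
  | succ i =>
    cases j with
    | zero => simp only [pvD] at h; by_contra hg; simp [eq_false_of_ne_true hg] at h
    | succ j => simp only [pvD] at h; by_contra hg; simp [eq_false_of_ne_true hg] at h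

theorem pvSpec_iff (n : Nat) (win : Int) (g : Nat → Nat → Bool) :
    (0 < win ∧ pvHasWin n win.toNat g) ↔
      ∃ i j : Nat, i < n ∧ j < n ∧ g i j = true ∧ pvD g i j = win := by
  constructor
  · rintro ⟨hw, r, c, hr, hc, hrun⟩
    have hw1 : 1 ≤ win.toNat := by omega
    have hD : win ≤ pvD g (r + (win.toNat - 1)) (c + (win.toNat - 1)) := by
      have := pvD_ge_of_run g r c win.toNat hrun (win.toNat - 1) (by omega)
      have hcast : ((win.toNat - 1 : Nat) : Int) + 1 = win := by push_cast; omega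
      omega
    obtain ⟨k, hk1, hk2, hk3⟩ := pvD_intermediate g win (by omega) _ _ hD
    refine ⟨r + (win.toNat - 1) - k, c + (win.toNat - 1) - k, by omega, by omega, ?_, hk3⟩
    exact pvD_pos_g g _ _ (by omega)
  · rintro ⟨i, j, hi, hj, hg, hD⟩
    have h1 := pvD_pos_of_g g i j hg
    have hw : 0 < win := by omega
    refine ⟨hw, ?_⟩
    obtain ⟨hb1, hb2, hrun⟩ := pvD_run g i j
    have htn : (pvD g i j).toNat = win.toNat := by omega
    rw [htn] at hb1 hb2 hrun
    refine ⟨i + 1 - win.toNat, j + 1 - win.toNat, by omega, by omega, ?_⟩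
    intro k hk
    have h := hrun (win.toNat - 1 - k) (by omega)
    rw [show i - (win.toNat - 1 - k) = i + 1 - win.toNat + k by omega,
        show j - (win.toNat - 1 - k) = j + 1 - win.toNat + k by omega] at h
    exact h

-- ===== VERDICT (by name: the statement is the Claim_ definition above) =====
theorem alignementD2_spec : Claim_equal_alignementD2 := by
  intro taille plateau win joueur _ _
  unfold Spec_alignementD2
  rw [Bool.eq_iff_iff, alignementD2_iff, alignementD2_alt_iff]
  exact pvSpec_iff taille.toNat win (pvG plateau joueur)
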